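-- pv_equiv track=rewrite | github.com/Min-Hyuk98/algorithm_study_HCI | 15.2개이하로다른비트0726.py | solution
-- ===== SOURCE A (Python) =====
-- def solution(numbers):
--     answer = []
--     for i in numbers:
--         i_ = i
--         if i % 2 == 0:
--             answer.append(i+1)
--         else:
--             num = 0
--             while True:
--                 if str(bin(i))[-2:] == '01' or i == 1:
--                     answer.append(i_+2**num)
--                     break
--                 num += 1
--                 i = i >> 1
--
--     return answer
-- ===== SOURCE B (Python) =====
-- def solution(numbers):
--     answer = []
--     for i in numbers:
--         if i % 2 == 0:
--             answer.append(i + 1)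
--         else:
--             x = i + 1
--             answer.append(i + ((x & -x) >> 1))
--     return answer
-- ===== Notes on version B (the rewrite author's own statement) =====
-- stated objective: simpler
-- what changed: The odd-branch while-loop that formats bin(i) as a string and inspects its last two characters while shifting i is replaced by the loop-free low-set-bit closed form i + (((i+1) & -(i+1)) >> 1).
-- outside the precondition, e.g. on solution([-5]): A returns [-4], B returns [-3]
import Mathlib
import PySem

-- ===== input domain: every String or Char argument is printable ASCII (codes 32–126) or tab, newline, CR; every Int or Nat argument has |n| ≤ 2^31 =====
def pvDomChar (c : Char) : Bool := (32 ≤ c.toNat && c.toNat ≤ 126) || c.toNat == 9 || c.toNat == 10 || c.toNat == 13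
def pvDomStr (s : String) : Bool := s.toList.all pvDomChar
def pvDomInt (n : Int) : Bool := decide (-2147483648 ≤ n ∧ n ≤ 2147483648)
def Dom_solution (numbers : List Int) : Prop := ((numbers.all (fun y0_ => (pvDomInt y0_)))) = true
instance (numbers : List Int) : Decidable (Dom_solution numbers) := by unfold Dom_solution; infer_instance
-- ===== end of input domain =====

-- B replaces A's per-element while-loop (which formats bin(i) and inspects its last two
-- characters while shifting i) by the loop-free low-set-bit closed form i + (((i+1) & -(i+1)) >> 1).

-- ===== PORT A =====
-- termination helper for the while-loop port (cited in decreasing_by)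
theorem pvShiftToNatLt (i : Int) (h : 1 < i) : (i >>> (1 : Nat)).toNat < i.toNat := by
  have hm : i = ((i.toNat : Nat) : Int) := by omega
  rw [hm]
  have : ((i.toNat : Int) >>> (1 : Nat)) = ((i.toNat >>> 1 : Nat) : Int) := rfl
  rw [this]
  have h2 : i.toNat >>> 1 = i.toNat / 2 := Nat.shiftRight_one _
  omega

-- the while-loop of A's odd branch: i the shifted value, i_ the saved original, num the counter.
-- The `i ≤ 1` guard only makes the function total: Python's loop never terminates there
-- (odd negative i), and those inputs are excluded by Pre_solution (i = 1 is caught by the condition).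
def solLoop (i i_ : Int) (num : Nat) : Int :=
  if PySem.Str.slice (PySem.Int.pyBin i) (some (-2)) none = "01" ∨ i = 1 then
    i_ + 2 ^ num
  else if i ≤ 1 then 0
  else solLoop (i >>> (1 : Nat)) i_ (num + 1)
termination_by i.toNat
decreasing_by exact pvShiftToNatLt i (by omega)

def solution (numbers : List Int) : List Int :=
  numbers.foldl
    (fun answer i =>
      if PySem.Int.mod i 2 = 0 then answer ++ [i + 1]
      else answer ++ [solLoop i i 0])
    []

-- ===== PORT B =====
def solution_alt (numbers : List Int) : List Int :=
  numbers.foldl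
    (fun answer i =>
      if PySem.Int.mod i 2 = 0 then answer ++ [i + 1]
      else
        let x := i + 1
        answer ++ [i + (PySem.Int.band x (-x) >>> (1 : Nat))])
    []

-- ===== PRECONDITION & SPEC =====
-- Pre_ excludes negative odd elements, outside the task's natural domain: there A's while-loop
-- either never terminates (e.g. -3: i >> 1 reaches and stays at -1 and the condition never fires)
-- or returns a value that is an accident of inspecting the sign-magnitude string bin(i) (e.g. -5).
def Pre_solution (numbers : List Int) : Prop :=
  ∀ n ∈ numbers, PySem.Int.mod n 2 = 0 ∨ 0 < n
instance (numbers : List Int) : Decidable (Pre_solution numbers) := by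
  unfold Pre_solution; infer_instance

def pvWitness_solution : List Int := [1, 2, 3, 4, 11, -6, 1023]

def Spec_solution (numbers : List Int) (out : List Int) : Prop := out = solution_alt numbers
instance (numbers : List Int) (out : List Int) : Decidable (Spec_solution numbers out) := by unfold Spec_solution; infer_instance

-- ===== CLAIM (what is proved, stated in full; the proofs are below) =====
def Claim_equal_solution : Prop := ∀ (numbers : List Int), Dom_solution numbers → Pre_solution numbers → Spec_solution numbers (solution numbers)

-- ===== LEMMAS AND PROOFS =====

-- `Nat.toDigitsCore` pushes its accumulator to the right
theorem pvToDigitsCoreAcc (b : Nat) :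
    ∀ (f n : Nat) (acc : List Char),
      Nat.toDigitsCore b f n acc = Nat.toDigitsCore b f n [] ++ acc := by
  intro f
  induction f with
  | zero => intro n acc; simp [Nat.toDigitsCore]
  | succ f ih =>
    intro n acc
    simp only [Nat.toDigitsCore]
    by_cases h : n / b = 0
    · simp [h]
    · simp only [h, if_false]
      rw [ih (n / b) (Nat.digitChar (n % b) :: acc), ih (n / b) [Nat.digitChar (n % b)]]
      simp

-- fuel irrelevance for `Nat.toDigitsCore` at base 2
theorem pvToDigitsCoreFuel :
    ∀ (f g n : Nat) (acc : List Char), n < f → n < g →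
      Nat.toDigitsCore 2 f n acc = Nat.toDigitsCore 2 g n acc := by
  intro f
  induction f with
  | zero => intro g n acc hf; omega
  | succ f ih =>
    intro g n acc hf hg
    obtain ⟨g', rfl⟩ : ∃ g', g = g' + 1 := ⟨g - 1, by omega⟩
    simp only [Nat.toDigitsCore]
    by_cases h : n / 2 = 0
    · simp [h]
    · simp only [h, if_false]
      exact ih g' (n / 2) _ (by omega) (by omega)

-- the recursive step of bin(): last binary digit split off
theorem pvToDigitsStep (n : Nat) (h : 2 ≤ n) :
    Nat.toDigits 2 n = Nat.toDigits 2 (n / 2) ++ [Nat.digitChar (n % 2)] := by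
  show Nat.toDigitsCore 2 (n + 1) n [] = Nat.toDigitsCore 2 (n / 2 + 1) (n / 2) [] ++ _
  rw [show Nat.toDigitsCore 2 (n + 1) n [] = Nat.toDigitsCore 2 n (n / 2) [Nat.digitChar (n % 2)] by
        simp only [Nat.toDigitsCore]; rw [if_neg (by omega)]]
  rw [pvToDigitsCoreAcc 2 n (n / 2) [Nat.digitChar (n % 2)]]
  rw [pvToDigitsCoreFuel n (n / 2 + 1) (n / 2) [] (by omega) (by omega)]

-- the last two binary digits of n ≥ 2
theorem pvToDigitsLastTwo (n : Nat) (h : 2 ≤ n) :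
    ∃ pre, Nat.toDigits 2 n = pre ++ [Nat.digitChar (n / 2 % 2), Nat.digitChar (n % 2)] := by
  rw [pvToDigitsStep n h]
  by_cases h4 : 4 ≤ n
  · exact ⟨Nat.toDigits 2 (n / 4), by rw [pvToDigitsStep (n / 2) (by omega)]; simp [Nat.div_div_eq_div_mul]⟩
  · refine ⟨[], ?_⟩
    interval_cases n <;> rfl

-- characterisation of A's loop condition  str(bin(i))[-2:] == '01'  for positive i
theorem pvCondIff (i : Int) (hi : 0 < i) :
    (PySem.Str.slice (PySem.Int.pyBin i) (some (-2)) none = "01") ↔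
      (2 ≤ i.toNat ∧ i.toNat / 2 % 2 = 0 ∧ i.toNat % 2 = 1) := by
  have hlist : (PySem.Int.pyBin i).toList = '0' :: 'b' :: Nat.toDigits 2 i.toNat := by
    rw [PySem.Int.toList_pyBin]
    simp [PySem.Int.toBinChars0b, show ¬ i < 0 by omega]
  have hslice : PySem.Str.slice (PySem.Int.pyBin i) (some (-2)) none =
      String.ofList (List.drop ((PySem.Int.pyBin i).toList.length - 2) (PySem.Int.pyBin i).toList) := by
    show String.ofList (PySem.Chars.slice _ _ _) = _
    rw [show PySem.Chars.slice (PySem.Int.pyBin i).toList (some (-2)) none =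
          PySem.List.slice (PySem.Int.pyBin i).toList (some (-2)) none from rfl]
    rw [PySem.List.slice_from_neg_ofNat _ 2 (by omega)]
  have hofList : ∀ xs : List Char, String.ofList xs = "01" ↔ xs = ['0', '1'] := by
    intro xs
    constructor
    · intro hx; have := congrArg String.toList hx; simpa using this
    · intro hx; subst hx; rfl
  rw [hslice, hofList, hlist]
  by_cases h2 : 2 ≤ i.toNat
  · obtain ⟨pre, hpre⟩ := pvToDigitsLastTwo i.toNat h2
    rw [hpre]
    have hlen : ('0' :: 'b' :: (pre ++ [Nat.digitChar (i.toNat / 2 % 2), Nat.digitChar (i.toNat % 2)])).length - 2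
        = pre.length + 2 := by simp
    rw [hlen]
    rw [show ('0' :: 'b' :: (pre ++ [Nat.digitChar (i.toNat / 2 % 2), Nat.digitChar (i.toNat % 2)]))
          = ('0' :: 'b' :: pre) ++ [Nat.digitChar (i.toNat / 2 % 2), Nat.digitChar (i.toNat % 2)] by simp]
    rw [show pre.length + 2 = ('0' :: 'b' :: pre).length by simp]
    rw [List.drop_left]
    constructor
    · intro hx
      simp only [List.cons.injEq, and_true] at hx
      obtain ⟨e1, e2⟩ := hx
      refine ⟨h2, ?_, ?_⟩
      · rcases Nat.mod_two_eq_zero_or_one (i.toNat / 2) with h | h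
        · exact h
        · rw [h] at e1; exact absurd e1 (by decide)
      · rcases Nat.mod_two_eq_zero_or_one i.toNat with h | h
        · rw [h] at e2; exact absurd e2 (by decide)
        · exact h
    · rintro ⟨-, ha, hb⟩
      rw [ha, hb]; rfl
  · have h1 : i.toNat = 1 := by omega
    rw [h1]
    constructor
    · intro hx; exact absurd hx (by decide)
    · intro hx; omega

-- Python's  x & -x  for positive x, as the Nat expression PySem.Int.band computes there
theorem pvBandLowbit (x : Int) (hx : 0 < x) :
    PySem.Int.band x (-x) = ((x.toNat - (x.toNat &&& (x.toNat - 1)) : Nat) : Int) := by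
  have h1 : (- -x - 1).toNat = x.toNat - 1 := by omega
  simp only [PySem.Int.band, if_pos (by omega : (0:Int) ≤ x), if_neg (by omega : ¬ (0:Int) ≤ -x), h1]

-- bit lemma: clearing the low bit of an odd number
theorem pvAndPredOdd (k : Nat) : (2 * k + 1) &&& (2 * k) = 2 * k := by
  apply Nat.eq_of_testBit_eq
  intro j
  cases j with
  | zero =>
    simp [Nat.testBit_zero, Nat.mul_mod_right]
  | succ j =>
    rw [Nat.testBit_and]
    simp only [Nat.testBit_succ]
    rw [show (2 * k + 1) / 2 = k by omega, show 2 * k / 2 = k by omega]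
    exact Bool.and_self _

-- bit lemma: the even halving step of  m &&& (m-1)
theorem pvAndPredEven (k : Nat) (hk : 0 < k) :
    (2 * k) &&& (2 * k - 1) = 2 * (k &&& (k - 1)) := by
  apply Nat.eq_of_testBit_eq
  intro j
  cases j with
  | zero =>
    simp [Nat.testBit_zero, Nat.mul_mod_right]
  | succ j =>
    rw [Nat.testBit_and]
    simp only [Nat.testBit_succ]
    rw [show (2 * k) / 2 = k by omega, show (2 * k - 1) / 2 = k - 1 by omega,
        show 2 * (k &&& (k - 1)) / 2 = k &&& (k - 1) by omega, Nat.testBit_and]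

-- lowbit m = m - (m &&& (m-1))
theorem pvLowbitOdd (m : Nat) (h : m % 2 = 1) : m - (m &&& (m - 1)) = 1 := by
  obtain ⟨k, rfl⟩ : ∃ k, m = 2 * k + 1 := ⟨m / 2, by omega⟩
  rw [show 2 * k + 1 - 1 = 2 * k by omega, pvAndPredOdd]
  omega

theorem pvLowbitEven (m : Nat) (h : m % 2 = 0) (h0 : 0 < m) :
    m - (m &&& (m - 1)) = 2 * (m / 2 - (m / 2 &&& (m / 2 - 1))) := by
  obtain ⟨k, rfl⟩ : ∃ k, m = 2 * k := ⟨m / 2, by omega⟩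
  rw [pvAndPredEven k (by omega), show 2 * k / 2 = k by omega]
  have := Nat.and_le_left (n := k) (m := k - 1)
  omega

theorem pvLowbitEvenParity (m : Nat) (h : m % 2 = 0) : (m - (m &&& (m - 1))) % 2 = 0 := by
  rcases Nat.eq_zero_or_pos m with h0 | h0
  · subst h0; rfl
  · rw [pvLowbitEven m h h0]; omega

-- the heart of the equivalence: A's while-loop computes B's closed form
theorem pvSolLoopEq :
    ∀ (n : Nat) (i i_ : Int) (num : Nat), i.toNat ≤ n → 0 < i → i % 2 = 1 →
      solLoop i i_ num = i_ + 2 ^ num * (PySem.Int.band (i + 1) (-(i + 1)) >>> (1 : Nat)) := by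
  intro n
  induction n with
  | zero => intro i i_ num hn hi; omega
  | succ n ih =>
    intro i i_ num hn hi hodd
    have hm : i.toNat % 2 = 1 := by omega
    have hband : PySem.Int.band (i + 1) (-(i + 1)) =
        (((i.toNat + 1) - ((i.toNat + 1) &&& (i.toNat + 1 - 1)) : Nat) : Int) := by
      have ht : (i + 1).toNat = i.toNat + 1 := by omega
      rw [pvBandLowbit (i + 1) (by omega), ht]
    have hshift : ∀ a : Nat, ((a : Int) >>> (1 : Nat)) = ((a >>> 1 : Nat) : Int) := fun a => rfl
    rw [solLoop]
    by_cases hcond : PySem.Str.slice (PySem.Int.pyBin i) (some (-2)) none = "01" ∨ i = 1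
    · rw [if_pos hcond]
      have hlow : (i.toNat + 1) - ((i.toNat + 1) &&& (i.toNat + 1 - 1)) = 2 := by
        rcases hcond with hc | hc
        · have := (pvCondIff i hi).mp hc
          have h4 : (i.toNat + 1) % 4 = 2 := by omega
          rw [pvLowbitEven _ (by omega) (by omega)]
          rw [pvLowbitOdd ((i.toNat + 1) / 2) (by omega)]
        · rw [show i.toNat = 1 by omega]; decide
      rw [hband, hlow, hshift, show (2 : Nat) >>> 1 = 1 from rfl]
      norm_num
    · rw [if_neg hcond]
      rw [not_or] at hcond
      obtain ⟨hs, h1⟩ := hcond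
      have hge3 : 3 ≤ i.toNat := by
        rcases Nat.lt_or_ge i.toNat 3 with h | h
        · exfalso
          have : i.toNat = 1 := by omega
          exact h1 (by omega)
        · exact h
      have hmod4 : i.toNat % 4 = 3 := by
        have := pvCondIff i hi
        rcases Nat.lt_or_ge (i.toNat / 2 % 2) 1 with h | h
        · exact absurd (this.mpr ⟨by omega, by omega, hm⟩) hs
        · omega
      rw [if_neg (by omega : ¬ i ≤ 1)]
      have hi' : i >>> (1 : Nat) = ((i.toNat / 2 : Nat) : Int) := by
        rw [show i = ((i.toNat : Nat) : Int) by omega, hshift]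
        norm_num [Nat.shiftRight_one]
      rw [hi']
      rw [ih ((i.toNat / 2 : Nat) : Int) i_ (num + 1) (by simp; omega) (by omega) (by
            rw [show (((i.toNat / 2 : Nat) : Int)) % 2 = ((i.toNat / 2 % 2 : Nat) : Int) by push_cast [Int.emod_emod_of_dvd]; omega]
            omega)]
      have hband' : PySem.Int.band (((i.toNat / 2 : Nat) : Int) + 1) (-(((i.toNat / 2 : Nat) : Int) + 1)) =
          (((i.toNat / 2 + 1) - ((i.toNat / 2 + 1) &&& (i.toNat / 2 + 1 - 1)) : Nat) : Int) := by
        have ht : (((i.toNat / 2 : Nat) : Int) + 1).toNat = i.toNat / 2 + 1 := by omega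
        rw [pvBandLowbit _ (by omega), ht]
      rw [hband, hband', hshift, hshift]
      set L : Nat := (i.toNat / 2 + 1) - ((i.toNat / 2 + 1) &&& (i.toNat / 2 + 1 - 1)) with hL
      have hbig : (i.toNat + 1) - ((i.toNat + 1) &&& (i.toNat + 1 - 1)) = 2 * L := by
        rw [pvLowbitEven (i.toNat + 1) (by omega) (by omega)]
        congr 1
        rw [hL]
        congr 2 <;> omega
      have hLpar : L % 2 = 0 := pvLowbitEvenParity (i.toNat / 2 + 1) (by omega)
      rw [hbig]
      rw [Nat.shiftRight_one, Nat.shiftRight_one]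
      have harith : (2 * L) / 2 = 2 * (L / 2) := by omega
      rw [harith]
      push_cast
      ring

-- per-element agreement folded over the list
theorem pvFoldEq :
    ∀ (numbers acc : List Int), (∀ n ∈ numbers, PySem.Int.mod n 2 = 0 ∨ 0 < n) →
      numbers.foldl
        (fun answer i =>
          if PySem.Int.mod i 2 = 0 then answer ++ [i + 1]
          else answer ++ [solLoop i i 0]) acc =
      numbers.foldl
        (fun answer i =>
          if PySem.Int.mod i 2 = 0 then answer ++ [i + 1]
          else
            let x := i + 1
            answer ++ [i + (PySem.Int.band x (-x) >>> (1 : Nat))]) acc := by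
  intro numbers
  induction numbers with
  | nil => intro acc _; rfl
  | cons i t ih =>
    intro acc hpre
    simp only [List.foldl_cons]
    by_cases he : PySem.Int.mod i 2 = 0
    · rw [if_pos he, if_pos he]
      exact ih _ (fun n hn => hpre n (List.mem_cons_of_mem i hn))
    · rw [if_neg he, if_neg he]
      have hi : 0 < i := by
        rcases hpre i List.mem_cons_self with h | h
        · exact absurd h he
        · exact h
      have hodd : i % 2 = 1 := by
        rw [PySem.Int.mod_eq_emod_of_pos (by omega)] at he
        omega
      rw [pvSolLoopEq i.toNat i i 0 (le_refl _) hi hodd]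
      simp only [pow_zero, one_mul]
      exact ih _ (fun n hn => hpre n (List.mem_cons_of_mem i hn))

-- ===== VERDICT (by name: the statement is the Claim_ definition above) =====
theorem solution_spec : Claim_equal_solution := by
  intro numbers _ hpre
  show solution numbers = solution_alt numbers
  exact pvFoldEq numbers [] hpre
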